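-- pv_equiv track=rewrite | github.com/RBVI/ChimeraX | src/bundles/mmcif/src/mmcif_write.py | _mmcif_chain_id
-- ===== SOURCE A (Python) =====
-- _CHAIN_CHARS = "ABCDEFGHIJKLMNOPQRSTUVWXYZabcdefghijklmnopqrstuvwxyz0123456789"
--
-- def _mmcif_chain_id(i):
--     # want A..9, AA..99
--     assert i > 0
--     i -= 1
--     num_chars = len(_CHAIN_CHARS)
--     max = num_chars
--     num_digits = 1
--     while i >= max:
--         i -= max
--         num_digits += 1
--         max = max * num_chars
--     if i == 0:
--         return _CHAIN_CHARS[0] * num_digits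
--     output = []
--     num_chars = len(_CHAIN_CHARS)
--     for d in range(num_digits):
--         output.append(_CHAIN_CHARS[i % num_chars])
--         i //= num_chars
--     output.reverse()
--     return ''.join(output)
-- ===== SOURCE B (Python) =====
-- _CHAIN_CHARS = "ABCDEFGHIJKLMNOPQRSTUVWXYZabcdefghijklmnopqrstuvwxyz0123456789"
--
-- def _mmcif_chain_id(i):
--     # want A..9, AA..99
--     assert i > 0
--     output = []
--     while i > 0:
--         i -= 1
--         output.append(_CHAIN_CHARS[i % 62])
--         i //= 62
--     output.reverse()
--     return ''.join(output)
-- ===== Notes on version B (the rewrite author's own statement) =====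
-- stated objective: simpler
-- what changed: Replaces A's two-phase scheme (a while-loop that finds the digit count by subtracting growing powers of 62, plus an all-'A' special case and a fixed-count digit loop) with a single standard bijective base-62 digit-peeling loop (i -= 1; emit i % 62; i //= 62).
-- outside the precondition, e.g. on _mmcif_chain_id(0): A raises AssertionError, B raises AssertionError
import Mathlib
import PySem

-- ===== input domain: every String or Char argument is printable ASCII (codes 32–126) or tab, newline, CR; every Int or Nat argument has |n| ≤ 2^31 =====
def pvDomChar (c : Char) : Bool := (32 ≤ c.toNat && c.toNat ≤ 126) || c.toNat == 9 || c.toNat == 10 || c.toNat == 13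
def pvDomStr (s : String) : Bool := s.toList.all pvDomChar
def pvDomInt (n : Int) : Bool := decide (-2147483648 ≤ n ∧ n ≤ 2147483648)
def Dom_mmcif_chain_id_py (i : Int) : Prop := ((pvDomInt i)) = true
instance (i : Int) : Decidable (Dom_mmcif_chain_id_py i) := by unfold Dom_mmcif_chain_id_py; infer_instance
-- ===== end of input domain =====

-- B replaces A's two-phase conversion (digit-count search + padded digit loop + all-'A' special
-- case) with one standard bijective base-62 digit-peeling loop; objective: simpler.

-- ===== PORT A =====
-- _CHAIN_CHARS as a list of characters
def pvChainChars : List Char :=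
  "ABCDEFGHIJKLMNOPQRSTUVWXYZabcdefghijklmnopqrstuvwxyz0123456789".toList

-- _CHAIN_CHARS[r % 62]; 0 ≤ r % 62 < 62 = len(_CHAIN_CHARS) always, so the .getD default is never used
def pvCharAt (r : Int) : Char :=
  (PySem.List.pyGet? pvChainChars (PySem.Int.mod r 62)).getD 'A'

-- the `while i >= max:` digit-count loop of A; the Nat argument is FUEL, a totality device only:
-- each pass removes max ≥ 62 from j, so fuel j.toNat + 1 is never exhausted (proved in pvPhase1F_spec)
def pvPhase1F : Nat → Int → Int → Int → Int × Int
  | 0, j, _, nd => (j, nd)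
  | f + 1, j, mx, nd => if mx ≤ j then pvPhase1F f (j - mx) (mx * 62) (nd + 1) else (j, nd)

def pvPhase1 (j mx nd : Int) : Int × Int := pvPhase1F (j.toNat + 1) j mx nd

-- the `for d in range(num_digits):` loop of A (append chars[i % 62]; i //= num_chars)
def pvDigitsA (r : Int) : Nat → List Char
  | 0 => []
  | n + 1 => pvCharAt r :: pvDigitsA (PySem.Int.floordiv r 62) n

-- Python: assert i > 0 (AssertionError excluded by Pre_); then i -= 1; digit-count loop;
-- `_CHAIN_CHARS[0] * num_digits` (= 'A' repeated) if i == 0; else digit loop, reversed, joined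
def mmcif_chain_id_py (i : Int) : String :=
  let p := pvPhase1 (i - 1) 62 1
  if p.1 = 0 then String.ofList (List.replicate p.2.toNat 'A')
  else String.ofList (pvDigitsA p.1 p.2.toNat).reverse

-- ===== PORT B =====
-- B's `while i > 0: i -= 1; output.append(_CHAIN_CHARS[i % 62]); i //= 62` (list in append order);
-- the Nat argument is FUEL, a totality device only: i strictly decreases, so fuel i.toNat suffices
def pvBLoopF : Nat → Int → List Char
  | 0, _ => []
  | f + 1, i =>
    if 0 < i then pvCharAt (i - 1) :: pvBLoopF f (PySem.Int.floordiv (i - 1) 62) else []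

def pvBLoop (i : Int) : List Char := pvBLoopF i.toNat i

-- B: assert i > 0 (Pre_); loop; output.reverse(); ''.join(output)
def mmcif_chain_id_py_alt (i : Int) : String :=
  String.ofList (pvBLoop i).reverse

-- ===== PRECONDITION & SPEC =====
-- Pre_ excludes exactly i ≤ 0, where A's `assert i > 0` raises AssertionError (B keeps the assert)
def Pre_mmcif_chain_id_py (i : Int) : Prop := 0 < i
instance (i : Int) : Decidable (Pre_mmcif_chain_id_py i) := by
  unfold Pre_mmcif_chain_id_py; infer_instance

def pvWitness_mmcif_chain_id_py : Int := 63

def Spec_mmcif_chain_id_py (i : Int) (out : String) : Prop := out = mmcif_chain_id_py_alt i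
instance (i : Int) (out : String) : Decidable (Spec_mmcif_chain_id_py i out) := by
  unfold Spec_mmcif_chain_id_py; infer_instance

-- ===== CLAIM (what is proved, stated in full; the proofs are below) =====
def Claim_equal_mmcif_chain_id_py : Prop :=
  ∀ (i : Int), Dom_mmcif_chain_id_py i → Pre_mmcif_chain_id_py i →
    Spec_mmcif_chain_id_py i (mmcif_chain_id_py i)

-- ===== LEMMAS AND PROOFS =====

-- digit value → character (proof-side view of pvCharAt on nonnegative inputs)
def pvChar (d : Nat) : Char := pvChainChars.getD d 'A'

-- ordinary base-62 digits of r, little-endian, padded/truncated to a fixed count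
def pvPadN (r : Nat) : Nat → List Nat
  | 0 => []
  | n + 1 => r % 62 :: pvPadN (r / 62) n

-- bijective base-62 digit values of i, little-endian (what B's loop peels off);
-- fuel-style structural recursion again (n / 62 ≤ n, so fuel n suffices: pvBijNF_stable)
def pvBijNF : Nat → Nat → List Nat
  | 0, _ => []
  | _ + 1, 0 => []
  | f + 1, n + 1 => n % 62 :: pvBijNF f (n / 62)

def pvBijN (n : Nat) : List Nat := pvBijNF n n

lemma pvBijNF_stable : ∀ (f g n : Nat), n ≤ f → n ≤ g → pvBijNF f n = pvBijNF g n := by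
  intro f
  induction f with
  | zero =>
    intro g n hf _
    interval_cases n
    cases g <;> simp [pvBijNF]
  | succ f ih =>
    intro g n hf hg
    match g, n with
    | 0, n => interval_cases n; simp [pvBijNF]
    | g + 1, 0 => simp [pvBijNF]
    | g + 1, n + 1 =>
      simp only [pvBijNF]
      rw [ih g (n / 62) (by omega) (by omega)]

lemma pvBijN_succ (n : Nat) : pvBijN (n + 1) = n % 62 :: pvBijN (n / 62) := by
  show pvBijNF (n + 1) (n + 1) = n % 62 :: pvBijN (n / 62)
  simp only [pvBijNF, pvBijN]
  rw [pvBijNF_stable n (n / 62) (n / 62) (by omega) (by omega)]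

-- pvG k = 62^0 + 62^1 + … + 62^(k-1)
def pvG : Nat → Nat
  | 0 => 0
  | k + 1 => 1 + 62 * pvG k

lemma pvCharAt_of_nonneg (r : Int) (hr : 0 ≤ r) : pvCharAt r = pvChar (r.toNat % 62) := by
  have hn : r = ((r.toNat : Nat) : Int) := by omega
  have h : PySem.Int.mod r 62 = ((r.toNat % 62 : Nat) : Int) := by
    rw [hn]; exact_mod_cast PySem.Int.mod_natCast r.toNat 62
  simp only [pvCharAt, pvChar, h, PySem.List.pyGet?_natCast, List.getD_eq_getElem?_getD]

-- the central arithmetic fact: bijective digits of r + pvG nd are the padded base-62 digits of r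
lemma pvBijN_pad (nd : Nat) : ∀ r : Nat, r < 62 ^ nd → pvBijN (r + pvG nd) = pvPadN r nd := by
  induction nd with
  | zero =>
    intro r hr
    interval_cases r
    simp [pvBijN, pvBijNF, pvPadN, pvG]
  | succ nd ih =>
    intro r hr
    have he : r + pvG (nd + 1) = (r + 62 * pvG nd) + 1 := by simp [pvG]; ring
    rw [he, pvBijN_succ]
    have hm : (r + 62 * pvG nd) % 62 = r % 62 := Nat.add_mul_mod_self_left r 62 (pvG nd)
    have hd : (r + 62 * pvG nd) / 62 = r / 62 + pvG nd := Nat.add_mul_div_left r (pvG nd) (by omega)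
    have hlt : r / 62 < 62 ^ nd := by
      rw [Nat.div_lt_iff_lt_mul (by omega)]
      calc r < 62 ^ (nd + 1) := hr
        _ = 62 ^ nd * 62 := by rw [pow_succ]
    rw [hm, hd, ih (r / 62) hlt, pvPadN]

-- B's loop computes the mapped bijective digits (fuel ≥ i is enough fuel)
lemma pvBLoopF_eq : ∀ (f : Nat) (i : Int), 0 ≤ i → i.toNat ≤ f →
    pvBLoopF f i = (pvBijN i.toNat).map pvChar := by
  intro f
  induction f with
  | zero =>
    intro i hi hf
    have h0 : i = 0 := by omega
    rw [h0]
    simp [pvBLoopF, pvBijN, pvBijNF]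
  | succ f ih =>
    intro i hi hf
    by_cases h : 0 < i
    · obtain ⟨n, hn⟩ : ∃ n, i.toNat = n + 1 := ⟨i.toNat - 1, by omega⟩
      have hcast : i - 1 = ((n : Nat) : Int) := by omega
      have hfd : PySem.Int.floordiv (i - 1) 62 = ((n / 62 : Nat) : Int) := by
        rw [hcast]; exact_mod_cast PySem.Int.floordiv_natCast n 62
      have hstep : pvBLoopF (f + 1) i
          = pvCharAt (i - 1) :: pvBLoopF f (PySem.Int.floordiv (i - 1) 62) := by
        simp only [pvBLoopF, if_pos h]
      rw [hstep, hfd, ih ((n / 62 : Nat) : Int) (by positivity) (by simp; omega),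
        pvCharAt_of_nonneg (i - 1) (by omega), hcast]
      rw [hn, pvBijN_succ]
      simp only [Int.toNat_natCast, List.map_cons]
    · have h0 : i = 0 := by omega
      rw [h0]
      simp [pvBLoopF, pvBijN, pvBijNF]

-- A's digit loop computes the mapped padded digits
lemma pvDigitsA_eq (n : Nat) : ∀ r : Int, 0 ≤ r → pvDigitsA r n = (pvPadN r.toNat n).map pvChar := by
  induction n with
  | zero => intro r _; simp [pvDigitsA, pvPadN]
  | succ n ih =>
    intro r hr
    have hn : r = ((r.toNat : Nat) : Int) := by omega
    have hfd : PySem.Int.floordiv r 62 = ((r.toNat / 62 : Nat) : Int) := by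
      rw [hn]; exact_mod_cast PySem.Int.floordiv_natCast r.toNat 62
    rw [pvDigitsA, pvPadN, hfd, ih ((r.toNat / 62 : Nat) : Int) (by positivity),
      Int.toNat_natCast, pvCharAt_of_nonneg r hr]
    simp only [List.map_cons]

-- invariant of A's digit-count loop: with enough fuel it returns (j - mx·pvG k, nd + k)
-- with the residue in range
lemma pvPhase1F_spec : ∀ (f : Nat) (j mx nd : Int), 0 ≤ j → 0 < mx → j.toNat < f →
    ∃ k : Nat, (pvPhase1F f j mx nd).1 = j - mx * (pvG k : Int) ∧
      (pvPhase1F f j mx nd).2 = nd + k ∧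
      0 ≤ j - mx * (pvG k : Int) ∧ j - mx * (pvG k : Int) < mx * 62 ^ k := by
  intro f
  induction f with
  | zero => intro j mx nd hj hm hf; omega
  | succ f ih =>
    intro j mx nd hj hm hf
    by_cases h : mx ≤ j
    · have hstep : pvPhase1F (f + 1) j mx nd = pvPhase1F f (j - mx) (mx * 62) (nd + 1) := by
        simp only [pvPhase1F, if_pos h]
      obtain ⟨k, h1, h2, h3, h4⟩ := ih (j - mx) (mx * 62) (nd + 1) (by omega) (by omega) (by omega)
      have hg : ((pvG (k + 1) : Nat) : Int) = 1 + 62 * (pvG k : Nat) := by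
        push_cast [pvG]; ring
      have he : j - mx * ((pvG (k + 1) : Nat) : Int) = (j - mx) - mx * 62 * (pvG k : Nat) := by
        rw [hg]; ring
      refine ⟨k + 1, ?_, ?_, ?_, ?_⟩
      · rw [hstep, h1, he]
      · rw [hstep, h2]; push_cast; ring
      · rw [he]; linarith
      · rw [he]
        calc (j - mx) - mx * 62 * (pvG k : Nat) < mx * 62 * 62 ^ k := h4
          _ = mx * 62 ^ (k + 1) := by rw [pow_succ]; ring
    · have hstep : pvPhase1F (f + 1) j mx nd = (j, nd) := by
        simp only [pvPhase1F, if_neg h]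
      refine ⟨0, ?_, ?_, ?_, ?_⟩
      · rw [hstep]; simp [pvG]
      · rw [hstep]; simp
      · simp [pvG]; omega
      · simp [pvG]; omega

lemma pvPhase1_spec (j mx nd : Int) (hj : 0 ≤ j) (hm : 0 < mx) :
    ∃ k : Nat, (pvPhase1 j mx nd).1 = j - mx * (pvG k : Int) ∧
      (pvPhase1 j mx nd).2 = nd + k ∧
      0 ≤ j - mx * (pvG k : Int) ∧ j - mx * (pvG k : Int) < mx * 62 ^ k :=
  pvPhase1F_spec (j.toNat + 1) j mx nd hj hm (by omega)

lemma pvPadN_zero (n : Nat) : pvPadN 0 n = List.replicate n 0 := by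
  induction n with
  | zero => simp [pvPadN]
  | succ n ih => simp [pvPadN, ih, List.replicate]

-- ===== VERDICT (by name: the statement is the Claim_ definition above) =====
theorem mmcif_chain_id_py_spec : Claim_equal_mmcif_chain_id_py := by
  intro i _ hpre
  unfold Spec_mmcif_chain_id_py mmcif_chain_id_py mmcif_chain_id_py_alt
  have hpre' : (0:Int) < i := hpre
  obtain ⟨k, h1, h2, h3, h4⟩ := pvPhase1_spec (i - 1) 62 1 (by omega) (by omega)
  set r : Int := (pvPhase1 (i - 1) 62 1).1 with hr
  have hnd : (pvPhase1 (i - 1) 62 1).2.toNat = k + 1 := by omega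
  have hrlt : r.toNat < 62 ^ (k + 1) := by
    have : r < 62 * 62 ^ k := by rw [h1]; exact h4
    have h62 : (62:Int) * 62 ^ k = ((62 ^ (k + 1) : Nat) : Int) := by push_cast; ring
    omega
  have hi : i.toNat = r.toNat + pvG (k + 1) := by
    have hg : ((pvG (k + 1) : Nat) : Int) = 1 + 62 * (pvG k : Nat) := by
      push_cast [pvG]; ring
    have : i = r + ((pvG (k + 1) : Nat) : Int) := by rw [hg, h1]; ring
    omega
  have hbij : pvBLoop i = (pvPadN r.toNat (k + 1)).map pvChar := by
    rw [pvBLoop, pvBLoopF_eq i.toNat i (by omega) (by omega), hi,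
      pvBijN_pad (k + 1) r.toNat hrlt]
  by_cases hz : r = 0
  · rw [if_pos hz, hbij, hnd]
    have : r.toNat = 0 := by omega
    rw [this, pvPadN_zero]
    have hc : pvChar 0 = 'A' := by decide
    simp [hc, List.map_replicate, List.reverse_replicate]
  · rw [if_neg hz, hnd, pvDigitsA_eq (k + 1) r (by omega), hbij]
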